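-- pv_equiv track=rewrite | github.com/realworldnav/realworldnav | main_app/services/decoders/decoder_adapters.py | can_decode
-- ===== SOURCE A (Python) =====
-- from typing import Dict, List, Optional, Any, Set
--
-- GONDI_CONTRACTS = {
--     "0xf41b389e0c1950dc0b16c9498eae77131cc08a56": "v1",
--     "0x478f6f994c6fb3cf3e444a489b3ad9edb8ccae16": "v2",
--     "0xf65b99ce6dc5f6c556172bcc0ff27d3665a7d9a8": "v3",
--     "0x59e0b87e3dcfb5d34c06c71c3fbf7f6b7d77a4ff": "multi_source",
-- }
--
-- def can_decode(tx: Dict, receipt: Dict) -> bool: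
--     """Check if transaction involves Gondi contracts"""
--     to_addr = (tx.get('to') or '').lower()
--     if to_addr in GONDI_CONTRACTS:
--         return True
--
--     for log in receipt.get('logs', []):
--         log_addr = log.get('address', '').lower()
--         if log_addr in GONDI_CONTRACTS:
--             return True
--
--     return False
-- ===== SOURCE B (Python) =====
-- GONDI_CONTRACTS = {
--     "0xf41b389e0c1950dc0b16c9498eae77131cc08a56": "v1",
--     "0x478f6f994c6fb3cf3e444a489b3ad9edb8ccae16": "v2",
--     "0xf65b99ce6dc5f6c556172bcc0ff27d3665a7d9a8": "v3",
--     "0x59e0b87e3dcfb5d34c06c71c3fbf7f6b7d77a4ff": "multi_source",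
-- }
--
-- def can_decode(tx, receipt):
--     """Check if transaction involves Gondi contracts"""
--     # Inverted search: for each known Gondi contract address, look for it
--     # among the transaction's addresses (the 'to' field and the log addresses).
--     addrs = [(tx.get('to') or '').lower()]
--     addrs += [log.get('address', '').lower() for log in receipt.get('logs', [])]
--     return any(contract in addrs for contract in GONDI_CONTRACTS)
-- ===== Notes on version B (the rewrite author's own statement) =====
-- stated objective: alternative
-- what changed: Inverts the search direction: instead of scanning the transaction's candidate addresses and testing each for membership in the contract table, B collects all candidate addresses once and then loops over the four known Gondi contract addresses, scanning the candidate list for each; correct because existence of a common element is symmetric.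
import Mathlib
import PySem

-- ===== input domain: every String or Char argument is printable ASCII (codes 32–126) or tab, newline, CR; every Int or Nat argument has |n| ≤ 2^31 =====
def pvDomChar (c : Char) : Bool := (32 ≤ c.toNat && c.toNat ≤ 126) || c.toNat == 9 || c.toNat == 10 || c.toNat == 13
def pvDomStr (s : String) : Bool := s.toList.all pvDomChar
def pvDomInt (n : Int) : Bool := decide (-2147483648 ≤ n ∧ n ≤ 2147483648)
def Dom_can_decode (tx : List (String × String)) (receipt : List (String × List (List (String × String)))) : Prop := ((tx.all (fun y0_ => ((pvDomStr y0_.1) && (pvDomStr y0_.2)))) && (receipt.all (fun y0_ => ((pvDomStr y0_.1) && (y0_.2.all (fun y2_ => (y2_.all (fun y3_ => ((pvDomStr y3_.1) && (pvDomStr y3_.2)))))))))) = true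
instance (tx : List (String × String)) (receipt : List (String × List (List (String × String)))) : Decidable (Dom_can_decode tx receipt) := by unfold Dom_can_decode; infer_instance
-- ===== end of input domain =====

-- ===== PORT A =====
-- B inverts the search direction: it collects the candidate addresses once and then
-- loops over the four known contract addresses, scanning the candidates for each;
-- objective: alternative (existence of a common element is symmetric).
def gondiKeys : List String :=
  ["0xf41b389e0c1950dc0b16c9498eae77131cc08a56",
   "0x478f6f994c6fb3cf3e444a489b3ad9edb8ccae16",
   "0xf65b99ce6dc5f6c556172bcc0ff27d3665a7d9a8",
   "0x59e0b87e3dcfb5d34c06c71c3fbf7f6b7d77a4ff"]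

-- the 'for log in …: if …: return True' loop of A, as structural recursion
def canDecodeLoop : List (List (String × String)) → Bool
  | [] => false
  | log :: rest =>
    let logAddr := PySem.Str.lower (PySem.Dict.getD (PySem.Dict.mk log) "address" "")
    if gondiKeys.contains logAddr then true else canDecodeLoop rest

def can_decode (tx : List (String × String)) (receipt : List (String × List (List (String × String)))) : Bool :=
  -- to_addr = (tx.get('to') or '').lower()  (values are strings, so 'or' only replaces None/'' by '')
  let toAddr := PySem.Str.lower ((PySem.Dict.get? (PySem.Dict.mk tx) "to").getD "")
  if gondiKeys.contains toAddr then true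
  else canDecodeLoop (PySem.Dict.getD (PySem.Dict.mk receipt) "logs" [])

-- ===== PORT B =====
def can_decode_alt (tx : List (String × String)) (receipt : List (String × List (List (String × String)))) : Bool :=
  let addrs : List String :=
    PySem.Str.lower ((PySem.Dict.get? (PySem.Dict.mk tx) "to").getD "") ::
      (PySem.Dict.getD (PySem.Dict.mk receipt) "logs" []).map
        (fun log => PySem.Str.lower (PySem.Dict.getD (PySem.Dict.mk log) "address" ""))
  gondiKeys.any (fun contract => addrs.contains contract)

-- ===== PRECONDITION & SPEC =====
def Spec_can_decode (tx : List (String × String)) (receipt : List (String × List (List (String × String)))) (out : Bool) : Prop := out = can_decode_alt tx receipt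
instance (tx : List (String × String)) (receipt : List (String × List (List (String × String)))) (out : Bool) : Decidable (Spec_can_decode tx receipt out) := by unfold Spec_can_decode; infer_instance

-- ===== CLAIM (what is proved, stated in full; the proofs are below) =====
def Claim_equal_can_decode : Prop := ∀ (tx : List (String × String)) (receipt : List (String × List (List (String × String)))), Dom_can_decode tx receipt → Spec_can_decode tx receipt (can_decode tx receipt)

-- ===== LEMMAS AND PROOFS =====
lemma loop_eq_any (logs : List (List (String × String))) :
    canDecodeLoop logs
      = logs.any (fun log => gondiKeys.contains (PySem.Str.lower (PySem.Dict.getD (PySem.Dict.mk log) "address" ""))) := by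
  induction logs with
  | nil => rfl
  | cons h t ih => simp [canDecodeLoop, ih]

-- ===== VERDICT (by name: the statement is the Claim_ definition above) =====
theorem can_decode_spec : Claim_equal_can_decode := by
  intro tx receipt _
  unfold Spec_can_decode can_decode can_decode_alt
  rw [loop_eq_any]
  rw [Bool.eq_iff_iff]
  simp only [Bool.if_true_left, Bool.or_eq_true, List.any_eq_true, List.contains_eq_mem,
    List.mem_cons, List.mem_map, decide_eq_true_eq]
  constructor
  · rintro (h | ⟨log, hlog, hmem⟩)
    · exact ⟨_, h, Or.inl rfl⟩
    · exact ⟨_, hmem, Or.inr ⟨log, hlog, rfl⟩⟩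
  · rintro ⟨k, hk, (rfl | ⟨log, hlog, rfl⟩)⟩
    · exact Or.inl hk
    · exact Or.inr ⟨log, hlog, hk⟩
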